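-- pv_equiv track=rewrite | github.com/Sapunov/qua | api/qua/api/search/snippets.py | _generate_phrases_ids
-- ===== SOURCE A (Python) =====
-- def _generate_phrases_ids(mapping, merged):
--
--     pos = None
--     result = []
--     tmp = []
--
--     for i in merged:
--         if pos is None:
--             pos = mapping[i] + 1
--             tmp.append(i)
--             continue
--
--         if mapping[i] != pos:
--             result.append(tmp)
--             pos = mapping[i] + 1
--             tmp = [i]
--         else:
--             pos += 1
--             tmp.append(i)
--
--     result.append(tmp)
--
--     return sorted(result, key=lambda x: len(x), reverse=True)
-- ===== SOURCE B (Python) =====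
-- from itertools import groupby
--
--
-- def _generate_phrases_ids(mapping, merged):
--     if not merged:
--         return [[]]  # one empty phrase group, as on a merge with no ids
--     groups = [[i for _, i in run]
--               for _, run in groupby(enumerate(merged),
--                                     key=lambda p: mapping[p[1]] - p[0])]
--     return sorted(groups, key=len, reverse=True)
-- ===== Notes on version B (the rewrite author's own statement) =====
-- stated objective: idiomatic
-- what changed: B replaces A's stateful run-splitting loop (pos/tmp/result accumulators) by the consecutive-integer key trick: groupby over enumerate(merged) with key mapping[i] - index, then the same length-descending sort; the empty-input answer [[]] is returned by an explicit guard.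
import Mathlib
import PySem

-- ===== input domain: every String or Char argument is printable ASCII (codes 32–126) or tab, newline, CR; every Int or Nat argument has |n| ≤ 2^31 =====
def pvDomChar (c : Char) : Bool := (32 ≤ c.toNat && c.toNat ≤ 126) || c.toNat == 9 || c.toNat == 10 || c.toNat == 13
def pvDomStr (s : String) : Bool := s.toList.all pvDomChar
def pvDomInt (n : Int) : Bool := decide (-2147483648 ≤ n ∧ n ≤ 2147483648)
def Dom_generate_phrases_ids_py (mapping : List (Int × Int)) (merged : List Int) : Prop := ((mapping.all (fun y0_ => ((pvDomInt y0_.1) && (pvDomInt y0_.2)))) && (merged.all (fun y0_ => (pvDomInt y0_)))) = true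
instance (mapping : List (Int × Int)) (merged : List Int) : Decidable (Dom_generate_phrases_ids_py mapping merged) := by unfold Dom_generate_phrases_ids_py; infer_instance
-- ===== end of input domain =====

-- B groups consecutive-position ids by the key mapping[i] - index (groupby over enumerate)
-- instead of A's stateful pos/tmp/result loop; same length-descending sort, same values.

-- mapping[i] in both Pythons is a dict lookup; Pre_ guarantees the key is present,
-- so the default 0 is never reached inside Pre_.
def pvDget (mapping : List (Int × Int)) (i : Int) : Int :=
  (PySem.Dict.ofList mapping).getD i 0

-- ===== PORT A =====
def pvStepA (mapping : List (Int × Int))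
    (s : Option Int × List (List Int) × List Int) (i : Int) :
    Option Int × List (List Int) × List Int :=
  match s with
  | (none, res, tmp) => (some (pvDget mapping i + 1), res, tmp ++ [i])
  | (some p, res, tmp) =>
      if pvDget mapping i ≠ p then (some (pvDget mapping i + 1), res ++ [tmp], [i])
      else (some (p + 1), res, tmp ++ [i])

def generate_phrases_ids_py (mapping : List (Int × Int)) (merged : List Int) : List (List Int) :=
  let st := merged.foldl (pvStepA mapping) (none, [], [])
  PySem.List.sorted (st.2.1 ++ [st.2.2]) (fun x => x.length) true

-- ===== PORT B =====
-- itertools.groupby on (key, value) pairs, collecting the values of each maximal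
-- contiguous run of equal keys.
def pvGroupBy (k : Int) (cur : List Int) : List (Int × Int) → List (List Int)
  | [] => [cur]
  | (k', i) :: rest =>
      if k' = k then pvGroupBy k (cur ++ [i]) rest
      else cur :: pvGroupBy k' [i] rest

def generate_phrases_ids_py_alt (mapping : List (Int × Int)) (merged : List Int) : List (List Int) :=
  match (PySem.List.enumerate merged).map (fun p => (pvDget mapping p.2 - p.1, p.2)) with
  | [] => [[]]   -- 'if not merged: return [[]]'
  | (k, i) :: rest => PySem.List.sorted (pvGroupBy k [i] rest) (fun x => x.length) true

-- ===== PRECONDITION & SPEC =====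
-- Pre_ excludes ids absent from mapping, on which both Pythons raise KeyError.
def Pre_generate_phrases_ids_py (mapping : List (Int × Int)) (merged : List Int) : Prop :=
  ∀ i ∈ merged, i ∈ mapping.map Prod.fst
instance (mapping : List (Int × Int)) (merged : List Int) : Decidable (Pre_generate_phrases_ids_py mapping merged) := by unfold Pre_generate_phrases_ids_py; infer_instance

def pvWitness_generate_phrases_ids_py : (List (Int × Int)) × List Int := ([(0, 5), (1, 6)], [0, 1])

def Spec_generate_phrases_ids_py (mapping : List (Int × Int)) (merged : List Int) (out : List (List Int)) : Prop := out = generate_phrases_ids_py_alt mapping merged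
instance (mapping : List (Int × Int)) (merged : List Int) (out : List (List Int)) : Decidable (Spec_generate_phrases_ids_py mapping merged out) := by unfold Spec_generate_phrases_ids_py; infer_instance

-- ===== CLAIM (what is proved, stated in full; the proofs are below) =====
def Claim_equal_generate_phrases_ids_py : Prop := ∀ (mapping : List (Int × Int)) (merged : List Int), Dom_generate_phrases_ids_py mapping merged → Pre_generate_phrases_ids_py mapping merged → Spec_generate_phrases_ids_py mapping merged (generate_phrases_ids_py mapping merged)

-- ===== LEMMAS AND PROOFS =====

-- the common description of the pre-sort groups: pvRuns p tmp xs extends the open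
-- group tmp (expecting position p next) through xs, splitting where the position breaks
def pvRuns (mapping : List (Int × Int)) (p : Int) (tmp : List Int) : List Int → List (List Int)
  | [] => [tmp]
  | i :: rest =>
      if pvDget mapping i ≠ p then tmp :: pvRuns mapping (pvDget mapping i + 1) [i] rest
      else pvRuns mapping (p + 1) (tmp ++ [i]) rest

theorem foldA_runs (mapping : List (Int × Int)) :
    ∀ (xs : List Int) (p : Int) (res : List (List Int)) (tmp : List Int),
      (let st := xs.foldl (pvStepA mapping) (some p, res, tmp)
       st.2.1 ++ [st.2.2]) = res ++ pvRuns mapping p tmp xs := by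
  intro xs
  induction xs with
  | nil => intro p res tmp; simp [pvRuns]
  | cons i rest ih =>
      intro p res tmp
      by_cases h : pvDget mapping i ≠ p
      · simp [pvStepA, pvRuns, h, ih]
      · simp [pvStepA, pvRuns, h, ih]

theorem gb_runs (mapping : List (Int × Int)) :
    ∀ (xs : List Int) (n k : Int) (tmp : List Int),
      pvGroupBy k tmp ((PySem.List.enumerate xs n).map
        (fun p => (pvDget mapping p.2 - p.1, p.2))) = pvRuns mapping (k + n) tmp xs := by
  intro xs
  induction xs with
  | nil => intro n k tmp; simp [PySem.List.enumerate_nil, pvGroupBy, pvRuns]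
  | cons i rest ih =>
      intro n k tmp
      rw [PySem.List.enumerate_cons]
      by_cases h : pvDget mapping i - n = k
      · have hp : ¬ pvDget mapping i ≠ k + n := by omega
        simp only [List.map_cons, pvGroupBy, if_pos h, pvRuns, if_neg hp, ih]
        congr 1
        omega
      · have hp : pvDget mapping i ≠ k + n := by omega
        simp only [List.map_cons, pvGroupBy, if_neg h, pvRuns, if_pos hp, ih]
        congr 2
        omega

-- ===== VERDICT =====
theorem generate_phrases_ids_py_spec : Claim_equal_generate_phrases_ids_py := by
  intro mapping merged _ _
  match merged with
  | [] =>
      show generate_phrases_ids_py mapping [] = generate_phrases_ids_py_alt mapping []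
      simp [generate_phrases_ids_py, generate_phrases_ids_py_alt, PySem.List.enumerate_nil,
        PySem.List.sorted, PySem.List.insertBy]
  | x :: xs =>
      show generate_phrases_ids_py mapping (x :: xs) = generate_phrases_ids_py_alt mapping (x :: xs)
      unfold generate_phrases_ids_py generate_phrases_ids_py_alt
      rw [PySem.List.enumerate_cons]
      simp only [List.map_cons, List.foldl_cons, pvStepA]
      rw [show (0:Int) + 1 = 1 from rfl, gb_runs mapping xs 1 (pvDget mapping x - 0) [x]]
      have := foldA_runs mapping xs (pvDget mapping x + 1) [] [x]
      simp only at this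
      simp only [List.nil_append]
      rw [this]
      norm_num
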